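-- pv_equiv track=rewrite | github.com/Donsworkout/boj_algorithm_python | simple_but_strong/prg_1.py | solution
-- ===== SOURCE A (Python) =====
-- def solution(scoville, K):
--     cnt = 0
--     sorted_scvs = sorted(scoville, reverse=True)
--
--     while (True):
--         sorted_scvs = sorted(sorted_scvs, reverse=True)
--         if sorted_scvs[-1] >= K:
--             return cnt
--         elif len(sorted_scvs) == 1:
--             return -1
--         else:
--             mixed_scv = sorted_scvs[-1] + 2 * sorted_scvs[-2]
--             del sorted_scvs[-1]
--             del sorted_scvs[-1]
--             sorted_scvs.append(mixed_scv)
--             cnt += 1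
-- ===== SOURCE B (Python) =====
-- def solution(scoville, K):
--     # Sort ascending once; afterwards keep the list sorted by inserting each mixed
--     # value at its binary-search position instead of re-sorting every iteration.
--     asc = sorted(scoville)
--     cnt = 0
--     while asc[0] < K:
--         if len(asc) == 1:
--             return -1
--         mixed = asc[0] + 2 * asc[1]
--         rest = asc[2:]
--         lo, hi = 0, len(rest)
--         while lo < hi:
--             mid = (lo + hi) // 2
--             if rest[mid] < mixed:
--                 lo = mid + 1
--             else:
--                 hi = mid
--         asc = rest[:lo] + [mixed] + rest[lo:]
--         cnt += 1
--     return cnt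
-- ===== Notes on version B (the rewrite author's own statement) =====
-- stated objective: alternative
-- what changed: B sorts once (ascending) and keeps the list sorted with a binary-search ordered insert of each mixed value, instead of A's full descending re-sort on every loop iteration; Pre_ only excludes the empty list, on which A raises IndexError.
import Mathlib
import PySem

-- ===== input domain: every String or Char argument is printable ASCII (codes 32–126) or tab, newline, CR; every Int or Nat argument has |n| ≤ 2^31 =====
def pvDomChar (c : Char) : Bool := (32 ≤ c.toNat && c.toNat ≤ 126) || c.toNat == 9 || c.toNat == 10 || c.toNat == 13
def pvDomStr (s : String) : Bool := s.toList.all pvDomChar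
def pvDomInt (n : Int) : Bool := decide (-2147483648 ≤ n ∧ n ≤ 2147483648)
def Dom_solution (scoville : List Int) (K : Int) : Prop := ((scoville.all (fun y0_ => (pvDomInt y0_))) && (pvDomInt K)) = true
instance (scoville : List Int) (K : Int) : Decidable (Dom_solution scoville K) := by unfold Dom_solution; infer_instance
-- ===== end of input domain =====

-- B replaces A's full descending re-sort in every loop iteration by one initial
-- ascending sort plus a binary-search ordered insert of each mixed value
-- (alternative algorithm; a timing run decides the speed label).

-- ===== PORT A =====
-- A's while-loop: re-sort descending, read the two last (smallest) elements,
-- replace them by the mix.  The fuel argument is only a totality guard: the list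
-- shrinks by one per pass, so fuel = initial length never runs out.
def runA : Nat → List Int → Int → Int → Int
  | 0, _, _, _ => 0   -- fuel exhausted: unreachable from solution's call
  | fuel + 1, l, K, cnt =>
    let s := PySem.List.sorted l (fun x => x) true
    match PySem.List.pyGet? s (-1) with
    | none => 0   -- IndexError on the empty list: excluded by Pre_solution
    | some last =>
      if last ≥ K then cnt
      else if s.length = 1 then -1
      else
        match PySem.List.pyGet? s (-2) with
        | none => 0   -- unreachable: s has ≥ 2 elements here
        | some second =>
          runA fuel (s.dropLast.dropLast ++ [last + 2 * second]) K (cnt + 1)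

def solution (scoville : List Int) (K : Int) : Int :=
  runA scoville.length (PySem.List.sorted scoville (fun x => x) true) K 0

-- ===== PORT B =====
-- binary search for the insertion point (Source B's inner lo/hi loop; the fuel
-- hi - lo is only a totality guard, the gap shrinks every round)
def bsGo : Nat → List Int → Int → Nat → Nat → Nat
  | 0, _, _, lo, _ => lo
  | fuel + 1, rest, m, lo, hi =>
    if lo < hi then
      let mid := (lo + hi) / 2
      if rest.getD mid 0 < m then bsGo fuel rest m (mid + 1) hi
      else bsGo fuel rest m lo mid
    else lo

-- Source B's outer while-loop on the ascending list (fuel = initial length, a totality guard)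
def runB : Nat → List Int → Int → Int → Int
  | 0, _, _, _ => 0   -- fuel exhausted: unreachable from solution_alt's call
  | _ + 1, [], _, _ => 0   -- IndexError on the empty list: excluded by Pre_solution
  | _ + 1, [x], K, cnt => if x < K then -1 else cnt
  | fuel + 1, x :: y :: rest, K, cnt =>
    if x < K then
      let mixed := x + 2 * y
      let lo := bsGo rest.length rest mixed 0 rest.length
      runB fuel (rest.take lo ++ mixed :: rest.drop lo) K (cnt + 1)
    else cnt

def solution_alt (scoville : List Int) (K : Int) : Int :=
  runB scoville.length (PySem.List.sorted scoville (fun x => x) false) K 0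

-- ===== PRECONDITION & SPEC =====
-- Pre_ excludes only the empty list, on which the Python A raises IndexError.
def Pre_solution (scoville : List Int) (K : Int) : Prop := scoville ≠ []
instance (scoville : List Int) (K : Int) : Decidable (Pre_solution scoville K) := by unfold Pre_solution; infer_instance
def pvWitness_solution : List Int × Int := ([2, 1, 3], 10)

def Spec_solution (scoville : List Int) (K : Int) (out : Int) : Prop := out = solution_alt scoville K
instance (scoville : List Int) (K : Int) (out : Int) : Decidable (Spec_solution scoville K out) := by unfold Spec_solution; infer_instance

-- ===== CLAIM (what is proved, stated in full; the proofs are below) =====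
def Claim_equal_solution : Prop := ∀ (scoville : List Int) (K : Int), Dom_solution scoville K → Pre_solution scoville K → Spec_solution scoville K (solution scoville K)

-- ===== LEMMAS AND PROOFS =====

-- the descending sort is the reverse of the ascending sort (ints: equal keys are equal)
theorem sorted_true_eq_reverse (l : List Int) :
    PySem.List.sorted l (fun x => x) true = (PySem.List.sorted l (fun x => x) false).reverse := by
  apply PySem.List.eq_of_perm_of_pairwise_le_of_injective (fun x : Int => -x) neg_injective
  · exact ((PySem.List.sorted_perm ..).trans
      (PySem.List.sorted_perm l (fun x => x) false).symm).trans
      ((PySem.List.sorted l (fun x => x) false).reverse_perm).symm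
  · exact (PySem.List.sorted_pairwise_rev (xs := l) (key := fun x => x)).imp (by intro a b h; omega)
  · exact (List.pairwise_reverse).mpr
      ((PySem.List.sorted_pairwise (xs := l) (key := fun x => x)).imp (by intro a b h; omega))

theorem getD_mono (l : List Int) (hp : l.Pairwise (· ≤ ·)) {i j : Nat}
    (hij : i ≤ j) (hj : j < l.length) : l.getD i 0 ≤ l.getD j 0 := by
  rcases Nat.lt_or_ge i j with h | h
  · rw [List.getD_eq_getElem _ _ (by omega), List.getD_eq_getElem _ _ hj]
    exact List.pairwise_iff_getElem.mp hp i j (by omega) hj h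
  · have : i = j := by omega
    subst this; exact le_refl _

theorem bsGo_spec_aux (rest : List Int) (m : Int) (hp : rest.Pairwise (· ≤ ·)) :
    ∀ (d lo hi : Nat), hi - lo ≤ d → lo ≤ hi → hi ≤ rest.length →
    (∀ i, i < lo → rest.getD i 0 < m) →
    (∀ j, hi ≤ j → j < rest.length → m ≤ rest.getD j 0) →
    bsGo d rest m lo hi ≤ rest.length ∧
    (∀ i, i < bsGo d rest m lo hi → rest.getD i 0 < m) ∧
    (∀ j, bsGo d rest m lo hi ≤ j → j < rest.length → m ≤ rest.getD j 0) := by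
  intro d
  induction d with
  | zero =>
    intro lo hi hd hlh hhl h3 h4
    simp only [bsGo]
    exact ⟨by omega, h3, fun j hj hjl => h4 j (by omega) hjl⟩
  | succ d ih =>
    intro lo hi hd hlh hhl h3 h4
    rw [bsGo]
    by_cases hcase : lo < hi
    · rw [if_pos hcase]
      simp only
      by_cases hm : rest.getD ((lo + hi) / 2) 0 < m
      · rw [if_pos hm]
        apply ih ((lo + hi) / 2 + 1) hi (by omega) (by omega) hhl
        · intro i hi2
          by_cases hil : i < lo
          · exact h3 i hil
          · exact lt_of_le_of_lt (getD_mono rest hp (by omega) (by omega)) hm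
        · exact h4
      · rw [if_neg hm]
        apply ih lo ((lo + hi) / 2) (by omega) (by omega) (by omega) h3
        intro j hj hjl
        by_cases hjh : hi ≤ j
        · exact h4 j hjh hjl
        · exact le_trans (not_lt.mp hm) (getD_mono rest hp hj hjl)
    · rw [if_neg hcase]
      exact ⟨by omega, h3, fun j hj hjl => h4 j (by omega) hjl⟩

theorem bsGo_spec (rest : List Int) (m : Int) (hp : rest.Pairwise (· ≤ ·)) :
    bsGo rest.length rest m 0 rest.length ≤ rest.length ∧
    (∀ i, i < bsGo rest.length rest m 0 rest.length → rest.getD i 0 < m) ∧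
    (∀ j, bsGo rest.length rest m 0 rest.length ≤ j → j < rest.length → m ≤ rest.getD j 0) :=
  bsGo_spec_aux rest m hp rest.length 0 rest.length (by omega) (by omega) (by omega)
    (by omega) (by omega)

-- the B-side ordered insert produces a sorted list
theorem insert_pairwise (rest : List Int) (m : Int) (hp : rest.Pairwise (· ≤ ·)) :
    (rest.take (bsGo rest.length rest m 0 rest.length) ++
      m :: rest.drop (bsGo rest.length rest m 0 rest.length)).Pairwise (· ≤ ·) := by
  obtain ⟨hle, hlt, hge⟩ := bsGo_spec rest m hp
  set lo := bsGo rest.length rest m 0 rest.length with hlo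
  have htake : ∀ t ∈ rest.take lo, t < m := by
    intro t ht
    obtain ⟨i, hi, rfl⟩ := List.mem_iff_getElem.mp ht
    rw [List.getElem_take]
    have hi2 : i < lo := by simp at hi; omega
    have := hlt i hi2
    rwa [List.getD_eq_getElem _ _ (by simp at hi; omega)] at this
  have hdrop : ∀ u ∈ rest.drop lo, m ≤ u := by
    intro u hu
    obtain ⟨j, hj, rfl⟩ := List.mem_iff_getElem.mp hu
    rw [List.getElem_drop]
    have hj2 : lo + j < rest.length := by simp at hj; omega
    have := hge (lo + j) (by omega) hj2
    rwa [List.getD_eq_getElem _ _ hj2] at this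
  apply List.pairwise_append.mpr
  refine ⟨hp.sublist (List.take_sublist _ _), ?_, ?_⟩
  · rw [List.pairwise_cons]
    exact ⟨hdrop, hp.sublist (List.drop_sublist _ _)⟩
  · intro t ht u hu
    rcases List.mem_cons.mp hu with rfl | hu2
    · exact le_of_lt (htake t ht)
    · exact le_trans (le_of_lt (htake t ht)) (hdrop u hu2)

-- the B-side ordered insert is a permutation of m :: rest
theorem insert_perm (rest : List Int) (m : Int) (lo : Nat) :
    (rest.take lo ++ m :: rest.drop lo).Perm (m :: rest) := by
  calc (rest.take lo ++ m :: rest.drop lo).Perm (m :: (rest.take lo ++ rest.drop lo)) :=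
        List.perm_middle
    _ = m :: rest := by rw [List.take_append_drop]

-- main invariant: one A-iteration on any bag equals one B-iteration on its ascending
-- sort, for any sufficient fuels on both sides
theorem main_lemma (n : Nat) : ∀ (l : List Int), l.length ≤ n → ∀ (K cnt : Int)
    (d e : Nat), l.length ≤ d → l.length ≤ e →
    runA d l K cnt = runB e (PySem.List.sorted l (fun x => x) false) K cnt := by
  induction n with
  | zero =>
    intro l hl K cnt d e _ _
    have : l = [] := List.eq_nil_of_length_eq_zero (by omega)
    subst this
    have h0 : PySem.List.sorted ([] : List Int) (fun x => x) false = [] :=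
      (PySem.List.sorted_eq_nil_iff [] (fun x => x) false).mpr rfl
    have h1 : PySem.List.sorted ([] : List Int) (fun x => x) true = [] :=
      (PySem.List.sorted_eq_nil_iff [] (fun x => x) true).mpr rfl
    rw [h0]
    cases d <;> cases e <;>
      simp [runA, runB, h1, PySem.List.pyGet?, PySem.List.pyIdx?]
  | succ n ih =>
    intro l hl K cnt d e hd he
    have hrev := sorted_true_eq_reverse l
    have hlen : (PySem.List.sorted l (fun x => x) false).length = l.length :=
      PySem.List.length_sorted ..
    rcases ha : PySem.List.sorted l (fun x => x) false with _ | ⟨x, _ | ⟨y, rest⟩⟩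
    · -- empty: both return the guard value 0 whatever the fuel
      have : l = [] := (PySem.List.sorted_eq_nil_iff l (fun x => x) false).mp ha
      subst this
      cases d <;> cases e <;>
        simp [runA, runB, hrev, ha, PySem.List.pyGet?, PySem.List.pyIdx?]
    · -- singleton
      have hlen1 : l.length = 1 := by rw [← hlen, ha]; rfl
      rcases d with _ | d; · omega
      rcases e with _ | e; · omega
      rw [runA]
      simp only [hrev, ha, List.reverse_singleton,
        PySem.List.pyGet?_neg_one, List.getLast?_singleton]
      by_cases hxK : x ≥ K
      · simp [runB, hxK, show ¬ x < K by omega]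
      · simp [runB, hxK, show x < K by omega]
    · -- two or more elements
      have hpa := PySem.List.sorted_pairwise (xs := l) (key := fun x => x)
      rw [ha] at hpa
      have hrest : rest.Pairwise (· ≤ ·) :=
        (List.pairwise_cons.mp (List.pairwise_cons.mp hpa).2).2
      have hlen2 : l.length = rest.length + 2 := by rw [← hlen, ha]; rfl
      rcases d with _ | d; · omega
      rcases e with _ | e; · omega
      rw [runA]
      simp only [hrev, ha, PySem.List.pyGet?_neg_one, List.getLast?_reverse, List.head?_cons,
        List.length_reverse, List.length_cons]
      by_cases hxK : x ≥ K
      · simp [runB, hxK, show ¬ x < K by omega]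
      · rw [if_neg hxK]
        rw [if_neg (by omega)]
        have hy : PySem.List.pyGet? (x :: y :: rest).reverse (-2) = some y := by
          rw [PySem.List.pyGet?_neg_ofNat _ 2 (by omega) (by simp)]
          rw [List.getElem?_reverse (by simp)]
          simp
        rw [hy]
        dsimp only
        have hdl : (x :: y :: rest).reverse.dropLast.dropLast = rest.reverse := by
          simp [List.reverse_cons]
        rw [hdl]
        rw [ih (rest.reverse ++ [x + 2 * y]) (by simp; omega) K (cnt + 1) d e
          (by simp; omega) (by simp; omega)]
        simp only [runB]
        rw [if_pos (show x < K by omega)]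
        congr 1
        apply PySem.List.sorted_id_eq_of_perm_of_pairwise
        · exact (insert_perm rest (x + 2 * y) _).trans
            (((rest.reverse_perm).symm.cons (x + 2 * y)).trans
              (List.perm_append_singleton _ _).symm)
        · exact insert_pairwise rest (x + 2 * y) hrest

-- ===== VERDICT (by name: the statement is the Claim_ definition above) =====
theorem solution_spec : Claim_equal_solution := by
  intro scoville K _ _
  unfold Spec_solution solution solution_alt
  have hlen : (PySem.List.sorted scoville (fun x => x) true).length = scoville.length :=
    PySem.List.length_sorted ..
  rw [main_lemma (PySem.List.sorted scoville (fun x => x) true).length _ le_rfl K 0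
    scoville.length scoville.length (by omega) (by omega)]
  congr 1
  exact PySem.List.sorted_eq_sorted_of_perm _ _ (fun x => x) (fun a b h => h)
    (PySem.List.sorted_perm ..)
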